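-- pv_equiv track=rewrite | github.com/kamek777/learning_python | projekty_pythona/function_divided_by_five.py | divided_by_five
-- ===== SOURCE A (Python) =====
-- def divided_by_five(lista):
--     count = 0
--     for element in lista:
--         if element % 5 == 0 and element < 100:
--             count += 1
--         elif element > 100:
--             return 0
--     return count
-- ===== SOURCE B (Python) =====
-- def divided_by_five(lista):
--     if any(e > 100 for e in lista):
--         return 0
--     return sum(1 for e in lista if e % 5 == 0 and e < 100)
-- ===== Notes on version B (the rewrite author's own statement) =====
-- stated objective: simpler
-- what changed: Replaced the single loop with early-exit state by two declarative passes: an any() check for an element > 100 (which forces result 0 regardless of position) and a generator-sum counting multiples of 5 below 100.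
import Mathlib
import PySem

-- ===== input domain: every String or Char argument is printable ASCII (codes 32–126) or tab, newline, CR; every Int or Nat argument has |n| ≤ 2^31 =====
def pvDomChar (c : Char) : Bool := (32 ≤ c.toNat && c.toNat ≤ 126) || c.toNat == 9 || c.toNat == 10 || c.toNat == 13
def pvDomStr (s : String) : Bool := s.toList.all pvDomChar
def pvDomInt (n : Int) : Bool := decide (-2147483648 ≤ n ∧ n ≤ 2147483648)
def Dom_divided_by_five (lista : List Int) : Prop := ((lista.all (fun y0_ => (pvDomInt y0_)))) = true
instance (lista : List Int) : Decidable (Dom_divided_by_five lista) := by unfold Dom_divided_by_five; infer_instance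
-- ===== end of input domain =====

-- B replaces A's single early-exit loop by two declarative passes (any >100 check, then a count); objective: simpler.

-- ===== PORT A =====
-- loop with accumulator `count`; the early `return 0` is the second branch
def dbfLoopA (count : Int) : List Int → Int
  | [] => count
  | e :: rest =>
    if PySem.Int.mod e 5 == 0 && e < 100 then dbfLoopA (count + 1) rest
    else if e > 100 then 0
    else dbfLoopA count rest

def divided_by_five (lista : List Int) : Int := dbfLoopA 0 lista

-- ===== PORT B =====
def divided_by_five_alt (lista : List Int) : Int :=
  if lista.any (fun e => decide (e > 100)) then 0
  else ((lista.countP (fun e => PySem.Int.mod e 5 == 0 && decide (e < 100))) : Int)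

-- ===== PRECONDITION & SPEC =====
def Spec_divided_by_five (lista : List Int) (out : Int) : Prop := out = divided_by_five_alt lista
instance (lista : List Int) (out : Int) : Decidable (Spec_divided_by_five lista out) := by unfold Spec_divided_by_five; infer_instance

-- ===== CLAIM (what is proved, stated in full; the proofs are below) =====
def Claim_equal_divided_by_five : Prop := ∀ (lista : List Int), Dom_divided_by_five lista → Spec_divided_by_five lista (divided_by_five lista)

-- ===== LEMMAS AND PROOFS =====
theorem dbfLoopA_eq (l : List Int) : ∀ count : Int,
    dbfLoopA count l =
      (if l.any (fun e => decide (e > 100)) then 0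
       else count + ((l.countP (fun e => PySem.Int.mod e 5 == 0 && decide (e < 100))) : Int)) := by
  induction l with
  | nil => intro count; simp [dbfLoopA]
  | cons e rest ih =>
    intro count
    by_cases h5 : (PySem.Int.mod e 5 == 0 && decide (e < 100)) = true
    · have hlt : e < 100 := by
        have h := h5; rw [Bool.and_eq_true] at h
        exact of_decide_eq_true h.2
      have hgt : (decide (e > 100)) = false := by simp; omega
      simp only [dbfLoopA, h5, if_true, ih, List.any_cons, hgt, Bool.false_or,
        List.countP_cons]
      split
      · rfl
      · push_cast; ring
    · simp only [dbfLoopA, h5, if_false, Bool.false_eq_true]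
      by_cases hgt : e > 100
      · have hgt' : (decide (e > 100)) = true := decide_eq_true hgt
        rw [if_pos hgt]
        simp [hgt', List.any_cons]
      · have hgt' : (decide (e > 100)) = false := decide_eq_false hgt
        simp only [if_neg hgt, ih, List.any_cons, hgt', Bool.false_or,
          List.countP_cons, h5, if_false, Bool.false_eq_true, Nat.add_zero]

-- ===== VERDICT (by name: the statement is the Claim_ definition above) =====
theorem divided_by_five_spec : Claim_equal_divided_by_five := by
  intro lista _
  unfold Spec_divided_by_five divided_by_five divided_by_five_alt
  rw [dbfLoopA_eq]
  split <;> simp
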